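-- pv_equiv track=rewrite | github.com/pypi-data/pypi-mirror-380 | packages/multi-storage-client/multi_storage_client-0.31.0-cp310-cp310-macosx_11_0_arm64.whl/multistorageclient/utils.py | extract_prefix_from_glob
-- ===== SOURCE A (Python) =====
-- def extract_prefix_from_glob(s: str) -> str:
--     parts = s.split("/")
--     prefix_parts = []
--
--     for part in parts:
--         # Check if the part contains any glob special characters
--         if any(c in part for c in "*?[]{}"):
--             break  # Stop if a glob character is found
--         prefix_parts.append(part)
--
--     prefix = "/".join(prefix_parts)
--     return prefix
-- ===== SOURCE B (Python) =====
-- def extract_prefix_from_glob(s: str) -> str: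
--     # One scan over the characters: remember the most recent separator index;
--     # at the first glob metacharacter, slice the string just before that separator.
--     last_slash = -1
--     for i, c in enumerate(s):
--         if c in "*?[]{}":
--             return "" if last_slash < 0 else s[:last_slash]
--         if c == "/":
--             last_slash = i
--     return s
-- ===== Notes on version B (the rewrite author's own statement) =====
-- stated objective: alternative
-- what changed: Replaces split-into-parts with per-part membership scans and a join by a single left-to-right character scan that tracks the index of the most recent separator and slices the original string at the first glob metacharacter.
import Mathlib
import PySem

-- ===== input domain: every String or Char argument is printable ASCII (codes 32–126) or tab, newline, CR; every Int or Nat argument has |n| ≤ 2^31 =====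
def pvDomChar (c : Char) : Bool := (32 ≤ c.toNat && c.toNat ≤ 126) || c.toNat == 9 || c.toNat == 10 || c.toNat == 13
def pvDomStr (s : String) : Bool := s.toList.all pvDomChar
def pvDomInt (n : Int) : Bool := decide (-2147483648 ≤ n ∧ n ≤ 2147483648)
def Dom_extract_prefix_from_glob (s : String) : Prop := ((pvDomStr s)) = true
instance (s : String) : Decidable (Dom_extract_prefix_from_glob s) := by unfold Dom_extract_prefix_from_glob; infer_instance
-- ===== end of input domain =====

-- Alternative decomposition: B replaces A's split / per-part scan / join with a single character scan that slices s at the computed boundary (same cost).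

-- ===== PORT A =====
-- any(c in part for c in "*?[]{}")
def hasGlobPart (part : List Char) : Bool :=
  "*?[]{}".toList.any (fun c => PySem.Chars.isIn [c] part)

-- the for-loop over parts with the prefix_parts accumulator (break on a glob part)
def prefixLoop : List (List Char) → List (List Char) → List (List Char)
  | [], acc => acc.reverse
  | p :: rest, acc => if hasGlobPart p then acc.reverse else prefixLoop rest (p :: acc)

def extract_prefix_from_glob (s : String) : String :=
  let parts := PySem.Chars.splitOn s.toList "/".toList
  String.ofList (PySem.Chars.join "/".toList (prefixLoop parts []))

-- ===== PORT B =====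
-- the enumerate loop: i is the current index, lastSlash the index of the last '/' seen (-1 if none)
def bGo (s : String) : List Char → Nat → Int → String
  | [], _, _ => s
  | c :: rest, i, lastSlash =>
    if PySem.Chars.isIn [c] "*?[]{}".toList then
      (if lastSlash < 0 then "" else String.ofList (PySem.Chars.slice s.toList none (some lastSlash)))
    else bGo s rest (i + 1) (if c = '/' then (i : Int) else lastSlash)

def extract_prefix_from_glob_alt (s : String) : String :=
  bGo s s.toList 0 (-1)

-- ===== PRECONDITION & SPEC =====
def Spec_extract_prefix_from_glob (s : String) (out : String) : Prop := out = extract_prefix_from_glob_alt s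
instance (s : String) (out : String) : Decidable (Spec_extract_prefix_from_glob s out) := by unfold Spec_extract_prefix_from_glob; infer_instance

-- ===== CLAIM (what is proved, stated in full; the proofs are below) =====
def Claim_equal_extract_prefix_from_glob : Prop := ∀ (s : String), Dom_extract_prefix_from_glob s → Spec_extract_prefix_from_glob s (extract_prefix_from_glob s)

-- ===== LEMMAS AND PROOFS =====

-- single-character glob test (B's per-character condition)
def gch (c : Char) : Bool := PySem.Chars.isIn [c] "*?[]{}".toList

-- simple recursive characterisation of splitting on one separator character
def splitChar (sep : Char) : List Char → List (List Char)
  | [] => [[]]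
  | c :: rest => if c = sep then [] :: splitChar sep rest
                 else (splitChar sep rest).modifyHead (c :: ·)

-- common functional spec: none = a glob char occurs before any '/',
-- some r = the non-glob prefix (the whole string if there is no glob char)
def Hfun : List Char → Option (List Char)
  | [] => some []
  | c :: rest =>
    if gch c then none
    else match Hfun rest with
      | some r => some (c :: r)
      | none => if c = '/' then some [] else none

theorem hasGlobPart_eq_any (p : List Char) : hasGlobPart p = p.any gch := by
  rw [Bool.eq_iff_iff]
  simp only [hasGlobPart, gch, List.any_eq_true, PySem.Chars.isIn_iff_infix,
    List.singleton_infix_iff]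
  exact ⟨fun ⟨c, h1, h2⟩ => ⟨c, h2, h1⟩, fun ⟨c, h1, h2⟩ => ⟨c, h2, h1⟩⟩

theorem modifyHead_fun_id (l : List (List Char)) : List.modifyHead (fun x => x) l = l := by
  cases l <;> simp

theorem splitChar_ne_nil (sep : Char) (cs : List Char) : splitChar sep cs ≠ [] := by
  cases cs with
  | nil => simp [splitChar]
  | cons c rest =>
    simp only [splitChar]
    split
    · simp
    · intro h
      exact splitChar_ne_nil sep rest (List.modifyHead_eq_nil_iff.mp h)

theorem go_eq (sep : Char) (l : List Char) : ∀ fuel cur acc, l.length < fuel →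
    PySem.Chars.splitOn.go [sep] fuel l cur acc
      = acc.reverse ++ ((splitChar sep l).modifyHead (cur.reverse ++ ·)) := by
  induction l with
  | nil =>
    intro fuel cur acc h
    match fuel with
    | fuel + 1 => simp [PySem.Chars.splitOn.go, splitChar]
  | cons c rest ih =>
    intro fuel cur acc h
    match fuel with
    | fuel + 1 =>
      rw [PySem.Chars.splitOn.go]
      by_cases hc : c = sep
      · have hp : [sep].isPrefixOf (c :: rest) = true := by simp [List.isPrefixOf, hc]
        rw [if_pos hp]
        have hd : List.drop [sep].length (c :: rest) = rest := by simp
        rw [hd, ih fuel [] (cur.reverse :: acc) (by simpa using h)]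
        simp [splitChar, hc, modifyHead_fun_id]
      · have hp : [sep].isPrefixOf (c :: rest) = false := by
          simp [List.isPrefixOf]; exact fun h' => hc h'.symm
        rw [if_neg (by simp [hp])]
        rw [ih fuel (c :: cur) acc (by simpa using h)]
        simp only [splitChar, if_neg hc]
        congr 1
        obtain ⟨p0, ps, hps⟩ : ∃ p0 ps, splitChar sep rest = p0 :: ps := by
          cases hsp : splitChar sep rest with
          | nil => exact absurd hsp (splitChar_ne_nil sep rest)
          | cons a b => exact ⟨a, b, rfl⟩
        simp [hps]

theorem splitOn_eq_splitChar (cs : List Char) (sep : Char) :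
    PySem.Chars.splitOn cs [sep] = splitChar sep cs := by
  rw [PySem.Chars.splitOn, go_eq sep cs (cs.length + 1) [] [] (by omega)]
  simp [modifyHead_fun_id]

theorem prefixLoop_acc (parts acc : List (List Char)) :
    prefixLoop parts acc = acc.reverse ++ prefixLoop parts [] := by
  induction parts generalizing acc with
  | nil => simp [prefixLoop]
  | cons p rest ih =>
    simp only [prefixLoop]
    split
    · simp
    · rw [ih (p :: acc), ih [p]]
      simp

theorem join_cons_head (c : Char) (p : List Char) (l : List (List Char)) :
    PySem.Chars.join ['/'] ((c :: p) :: l) = c :: PySem.Chars.join ['/'] (p :: l) := by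
  cases l with
  | nil => simp [PySem.Chars.join_singleton]
  | cons q l' => rw [PySem.Chars.join_cons_cons, PySem.Chars.join_cons_cons]; simp

theorem gch_slash : gch '/' = false := by decide

theorem A_side (cs : List Char) :
    ∃ p0 ps, splitChar '/' cs = p0 :: ps ∧
      (if p0.any gch then Hfun cs = none ∧ prefixLoop (p0 :: ps) [] = []
       else ∃ r, Hfun cs = some r ∧
          PySem.Chars.join ['/'] (prefixLoop (p0 :: ps) []) = r) := by
  induction cs with
  | nil =>
    refine ⟨[], [], rfl, ?_⟩
    have h0 : hasGlobPart [] = false := by decide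
    simp [Hfun, prefixLoop, h0, PySem.Chars.join_singleton]
  | cons c rest ih =>
    obtain ⟨p0, ps, hsp, hif⟩ := ih
    by_cases hg : gch c = true
    · have hc : c ≠ '/' := fun h => by rw [h] at hg; exact absurd hg (by simp [gch_slash])
      refine ⟨c :: p0, ps, by simp [splitChar, hc, hsp], ?_⟩
      rw [if_pos (by simp [hg])]
      constructor
      · simp [Hfun, hg]
      · have e : prefixLoop ((c :: p0) :: ps) [] =
            if hasGlobPart (c :: p0) = true then ([] : List (List Char)).reverse
            else prefixLoop ps [c :: p0] := rfl
        rw [e, hasGlobPart_eq_any]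
        simp [hg]
    · have hg' : gch c = false := by simpa using hg
      by_cases hc : c = '/'
      · subst hc
        refine ⟨[], p0 :: ps, by simp [splitChar, hsp], ?_⟩
        rw [if_neg (by simp)]
        have h0 : hasGlobPart [] = false := by decide
        have hstep : prefixLoop ([] :: p0 :: ps) [] = [] :: prefixLoop (p0 :: ps) [] := by
          have e : prefixLoop ([] :: p0 :: ps) [] =
              if hasGlobPart [] = true then ([] : List (List Char)).reverse
              else prefixLoop (p0 :: ps) [[]] := rfl
          rw [e, h0, if_neg (by simp), prefixLoop_acc (p0 :: ps) [[]]]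
          simp
        by_cases hp0 : p0.any gch = true
        · rw [if_pos hp0] at hif
          refine ⟨[], ?_, ?_⟩
          · simp [Hfun, gch_slash, hif.1]
          · rw [hstep, hif.2]
            simp [PySem.Chars.join_singleton]
        · rw [if_neg hp0] at hif
          obtain ⟨r, hr, hj⟩ := hif
          refine ⟨'/' :: r, ?_, ?_⟩
          · simp [Hfun, gch_slash, hr]
          · have hpl : prefixLoop (p0 :: ps) [] = p0 :: prefixLoop ps [] := by
              have e : prefixLoop (p0 :: ps) [] =
                  if hasGlobPart p0 = true then ([] : List (List Char)).reverse
                  else prefixLoop ps [p0] := rfl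
              rw [e, hasGlobPart_eq_any, if_neg (by simp [hp0]), prefixLoop_acc ps [p0]]
              simp
            rw [hpl] at hj
            rw [hstep, hpl, PySem.Chars.join_cons_cons, hj]
            simp
      · refine ⟨c :: p0, ps, by simp [splitChar, hc, hsp], ?_⟩
        have hany : (c :: p0).any gch = p0.any gch := by simp [hg']
        by_cases hp0 : p0.any gch = true
        · rw [if_pos (by simp [hany, hp0])]
          rw [if_pos hp0] at hif
          constructor
          · simp [Hfun, hg', hif.1, hc]
          · have e : prefixLoop ((c :: p0) :: ps) [] =
                if hasGlobPart (c :: p0) = true then ([] : List (List Char)).reverse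
                else prefixLoop ps [c :: p0] := rfl
            rw [e, hasGlobPart_eq_any, hany, if_pos hp0]
            simp
        · rw [if_neg (by simp [hany, hp0])]
          rw [if_neg hp0] at hif
          obtain ⟨r, hr, hj⟩ := hif
          refine ⟨c :: r, ?_, ?_⟩
          · simp [Hfun, hg', hr]
          · have hpl : prefixLoop ((c :: p0) :: ps) [] = (c :: p0) :: prefixLoop ps [] := by
              have e : prefixLoop ((c :: p0) :: ps) [] =
                  if hasGlobPart (c :: p0) = true then ([] : List (List Char)).reverse
                  else prefixLoop ps [c :: p0] := rfl
              rw [e, hasGlobPart_eq_any, hany, if_neg (by simp [hp0]), prefixLoop_acc ps [c :: p0]]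
              simp
            have hpl' : prefixLoop (p0 :: ps) [] = p0 :: prefixLoop ps [] := by
              have e : prefixLoop (p0 :: ps) [] =
                  if hasGlobPart p0 = true then ([] : List (List Char)).reverse
                  else prefixLoop ps [p0] := rfl
              rw [e, hasGlobPart_eq_any, if_neg (by simp [hp0]), prefixLoop_acc ps [p0]]
              simp
            rw [hpl, join_cons_head, ← hpl', hj]

theorem B_side (s : String) (v u : List Char) (ls : Int) (h : s.toList = u ++ v) :
    bGo s v u.length ls = String.ofList (match Hfun v with
      | none => if ls < 0 then [] else s.toList.take ls.toNat
      | some r => u ++ r) := by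
  induction v generalizing u ls with
  | nil =>
    simp only [bGo, Hfun]
    simp [← h]
  | cons c rest ih =>
    by_cases hg : gch c = true
    · have hg2 : PySem.Chars.isIn [c] "*?[]{}".toList = true := hg
      simp only [bGo, hg2, if_true, Hfun, hg]
      by_cases hls : ls < 0
      · simp [hls]
      · rw [if_neg hls, if_neg hls]
        congr 1
        rw [PySem.Chars.slice_eq_listSlice]
        rw [show ls = ((ls.toNat : Nat) : Int) by omega]
        simp [PySem.List.slice_to]
    · have hg' : PySem.Chars.isIn [c] "*?[]{}".toList = false := by simpa [gch] using hg
      simp only [bGo, hg', Bool.false_eq_true, if_false]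
      have hu : s.toList = (u ++ [c]) ++ rest := by simpa using h
      have hlen : (u ++ [c]).length = u.length + 1 := by simp
      by_cases hc : c = '/'
      · rw [if_pos hc]
        have hih := ih (u ++ [c]) (u.length : Int) hu
        rw [hlen] at hih
        rw [hih]
        simp only [Hfun, hg, Bool.false_eq_true, if_false]
        cases hrest : Hfun rest with
        | none =>
          simp only [if_pos hc]
          congr 1
          rw [if_neg (by omega)]
          rw [show ((u.length : Int)).toNat = u.length by simp]
          rw [h, hc]
          rw [show u ++ '/' :: rest = u ++ ('/' :: rest) from rfl]
          rw [List.take_left]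
          simp
        | some r =>
          congr 1
          rw [hc]
          simp
      · rw [if_neg hc]
        have hih := ih (u ++ [c]) ls hu
        rw [hlen] at hih
        rw [hih]
        simp only [Hfun, hg, Bool.false_eq_true, if_false]
        cases hrest : Hfun rest with
        | none => simp [hc]
        | some r => simp

-- ===== VERDICT (by name: the statement is the Claim_ definition above) =====
theorem extract_prefix_from_glob_spec : Claim_equal_extract_prefix_from_glob := by
  intro s _
  show extract_prefix_from_glob s = extract_prefix_from_glob_alt s
  have hB := B_side s s.toList [] (-1) (by simp)
  have hA := A_side s.toList
  obtain ⟨p0, ps, hsp, hif⟩ := hA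
  have hsep : "/".toList = ['/'] := rfl
  rw [extract_prefix_from_glob_alt]
  simp only [List.length_nil] at hB
  rw [hB]
  rw [extract_prefix_from_glob]
  simp only [hsep, splitOn_eq_splitChar, hsp]
  by_cases hp0 : p0.any gch = true
  · rw [if_pos hp0] at hif
    rw [hif.1, hif.2]
    simp [PySem.Chars.join_nil]
  · rw [if_neg hp0] at hif
    obtain ⟨r, hr, hj⟩ := hif
    rw [hr, hj]
    simp
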